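-- pv_equiv track=rewrite | github.com/Beibaibaby/sampleoverjoin | src/uq3/uq3_direct_overlap.py | p_set
-- ===== SOURCE A (Python) =====
-- def p_set(nums):
--     ans_all = [[]]
--
--     for n in nums:
--         ans_all += [a+[n] for a in ans_all]
--
--     ans = []
--     for i in ans_all:
--         if len(i) > 1:
--             ans.append(i)
--
--     return ans
-- ===== SOURCE B (Python) =====
-- def p_set(nums):
--     items = list(nums)
--     n = len(items)
--     ans = []
--     for mask in range(2 ** n):
--         sub = [x for i, x in enumerate(items) if (mask // 2 ** i) % 2 == 1]
--         if len(sub) > 1: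
--             ans.append(sub)
--     return ans
-- ===== Notes on version B (the rewrite author's own statement) =====
-- stated objective: alternative
-- what changed: Replaces A's iterative list-doubling (rebuilding the whole powerset list each step) by direct bitmask enumeration: one loop over masks 0..2^n-1 that materialises each subset from the mask's bits, filtering by size on the fly.
import Mathlib
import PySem

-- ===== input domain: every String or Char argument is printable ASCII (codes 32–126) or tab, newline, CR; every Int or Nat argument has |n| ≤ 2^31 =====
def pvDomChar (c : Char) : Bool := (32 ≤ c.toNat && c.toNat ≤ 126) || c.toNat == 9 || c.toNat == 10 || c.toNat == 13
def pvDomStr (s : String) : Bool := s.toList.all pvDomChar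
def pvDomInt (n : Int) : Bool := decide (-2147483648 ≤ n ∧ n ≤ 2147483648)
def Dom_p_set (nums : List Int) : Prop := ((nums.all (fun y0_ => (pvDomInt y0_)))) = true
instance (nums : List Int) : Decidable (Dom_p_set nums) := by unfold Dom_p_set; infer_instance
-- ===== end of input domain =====

-- B replaces A's iterative powerset doubling by bitmask enumeration (same order, same output); alternative decomposition, same cost.

-- ===== PORT A =====
def p_set (nums : List Int) : List (List Int) :=
  let ans_all := nums.foldl (fun acc n => acc ++ acc.map (fun a => a ++ [n])) [[]]
  ans_all.foldl (fun ans i => if 1 < i.length then ans ++ [i] else ans) []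

-- ===== PORT B =====
-- subset built from the bits of mask: [x for i, x in enumerate(items) if (mask // 2**i) % 2 == 1]
-- (enumerate ported as List.zipIdx, pairs (x, i); indices are the same Nats 0..n-1)
def pMaskSub (items : List Int) (mask : Nat) : List Int :=
  ((items.zipIdx).filter (fun p => mask / 2 ^ p.2 % 2 = 1)).map (·.1)

def p_set_alt (nums : List Int) : List (List Int) :=
  let items := nums
  let n := items.length
  (List.range (2 ^ n)).foldl (fun ans mask =>
    let sub := pMaskSub items mask
    if 1 < sub.length then ans ++ [sub] else ans) []

-- ===== PRECONDITION & SPEC =====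
def Spec_p_set (nums : List Int) (out : List (List Int)) : Prop := out = p_set_alt nums
instance (nums : List Int) (out : List (List Int)) : Decidable (Spec_p_set nums out) := by unfold Spec_p_set; infer_instance

-- ===== CLAIM (what is proved, stated in full; the proofs are below) =====
def Claim_equal_p_set : Prop := ∀ (nums : List Int), Dom_p_set nums → Spec_p_set nums (p_set nums)

-- ===== LEMMAS AND PROOFS =====

-- the 'if len > 1: append' loop is a filter
theorem pv_foldl_filter {α : Type} (P : α → Prop) [DecidablePred P] (l acc : List α) :
    l.foldl (fun ans i => if P i then ans ++ [i] else ans) acc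
      = acc ++ l.filter (fun i => decide (P i)) := by
  induction l generalizing acc with
  | nil => simp
  | cons x xs ih =>
    simp only [List.foldl_cons, List.filter_cons, ih]
    by_cases h : P x <;> simp [h]

theorem pv_foldl_map_filter {α β : Type} (f : α → β) (P : β → Prop) [DecidablePred P]
    (l : List α) (acc : List β) :
    l.foldl (fun ans x => if P (f x) then ans ++ [f x] else ans) acc
      = acc ++ (l.filter (fun x => decide (P (f x)))).map f := by
  induction l generalizing acc with
  | nil => simp
  | cons x xs ih =>
    simp only [List.foldl_cons, List.filter_cons, ih]
    by_cases h : P (f x) <;> simp [h]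

theorem pMaskSub_low {l : List Int} {x : Int} {m : Nat} (hm : m < 2 ^ l.length) :
    pMaskSub (l ++ [x]) m = pMaskSub l m := by
  have h0 : m / 2 ^ l.length = 0 := Nat.div_eq_of_lt hm
  simp [pMaskSub, List.zipIdx_append, List.filter_append, h0]

theorem pMaskSub_high {l : List Int} {x : Int} {m : Nat} (hm : m < 2 ^ l.length) :
    pMaskSub (l ++ [x]) (2 ^ l.length + m) = pMaskSub l m ++ [x] := by
  have hk : (2 ^ l.length + m) / 2 ^ l.length = 1 := by
    have h0 : m / 2 ^ l.length = 0 := Nat.div_eq_of_lt hm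
    rw [Nat.add_div_left m (by positivity : 0 < 2 ^ l.length)]
    omega
  have hfc : ∀ p ∈ l.zipIdx, ((2 ^ l.length + m) / 2 ^ p.2 % 2 = 1 : Bool)
      = (m / 2 ^ p.2 % 2 = 1 : Bool) := by
    intro p hp
    have hi : p.2 < l.length := by
      have := List.snd_lt_of_mem_zipIdx hp; simpa using this
    have hd : (2 ^ l.length + m) / 2 ^ p.2 = 2 ^ (l.length - p.2) + m / 2 ^ p.2 := by
      have : 2 ^ l.length = 2 ^ p.2 * 2 ^ (l.length - p.2) := by
        rw [← pow_add]; congr 1; omega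
      rw [this, Nat.mul_add_div (by positivity : 0 < 2 ^ p.2)]
    have he : 2 ^ (l.length - p.2) % 2 = 0 := by
      have h1 : 1 ≤ l.length - p.2 := by omega
      have : 2 ^ (l.length - p.2) = 2 * 2 ^ (l.length - p.2 - 1) := by
        rw [← pow_succ']; congr 1; omega
      omega
    rw [hd]
    have : (2 ^ (l.length - p.2) + m / 2 ^ p.2) % 2 = m / 2 ^ p.2 % 2 := by omega
    rw [this]
  simp only [pMaskSub, List.zipIdx_append, List.filter_append, List.filter_congr hfc]
  simp [hk]

-- A's doubling loop enumerates exactly the subsets of masks 0..2^n-1, in mask order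
theorem gen_eq_map_masks (nums : List Int) :
    nums.foldl (fun acc n => acc ++ acc.map (fun a => a ++ [n])) [[]]
      = (List.range (2 ^ nums.length)).map (pMaskSub nums) := by
  induction nums using List.reverseRecOn with
  | nil => simp [pMaskSub]
  | append_singleton l x ih =>
    rw [List.foldl_append, List.foldl_cons, List.foldl_nil, ih]
    have hlen : (l ++ [x]).length = l.length + 1 := by simp
    rw [hlen, pow_succ, Nat.mul_two, List.range_add, List.map_append]
    simp only [List.map_map]
    congr 1
    · exact List.map_congr_left fun m hm =>
        (pMaskSub_low (List.mem_range.mp hm)).symm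
    · exact List.map_congr_left fun m hm => by
        have := pMaskSub_high (l := l) (x := x) (List.mem_range.mp hm)
        simp only [Function.comp_apply]
        exact this.symm

-- ===== VERDICT (by name: the statement is the Claim_ definition above) =====
theorem p_set_spec : Claim_equal_p_set := by
  intro nums _
  show p_set nums = p_set_alt nums
  unfold p_set p_set_alt
  simp only [gen_eq_map_masks,
    pv_foldl_filter (fun i : List Int => 1 < i.length),
    pv_foldl_map_filter (pMaskSub nums) (fun i : List Int => 1 < i.length),
    List.nil_append, List.filter_map]
  rfl
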